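-- pv_equiv track=rewrite | github.com/MIT-Emerging-Talent/ET6-practice-code-review | solutions/only_in_one_list.py | only_in_one_list
-- ===== SOURCE A (Python) =====
-- def only_in_one_list(a: list, b: list, c: str) -> bool:
--     """
--     function looks for item in both lists. returns true if found in only one
--
--     parameters:
--     a: a list containing strings
--     b: a list containing strings
--     c: a str
--
--     Returns:
--     True if item is in only one of the lists
--
--     >>> only_in_one_list([], ["cup"], "spoon")
--     Traceback (most recent call last):
--     ...
--     AssertionError: Empty list
--
--     >>> only_in_one_list([1, 3, 6], ["cup"], "spoon")
--     Traceback (most recent call last):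
--     ...
--     AssertionError: item type not str
--
--     >>> only_in_one_list(["spoon", "hat", 6], ["cup"], "spoon")
--     Traceback (most recent call last):
--     ...
--     AssertionError: item type not str
--
--     >>> only_in_one_list(["s", "p", "o", "o", "n"], ["cup"], "spoon")
--     False
--
--     >>> only_in_one_list(["s", "p", "o", "o", "n"], ["cup"], "p")
--     True
--
--     >>> only_in_one_list(["s", "p", "o", "o", "n"], ["s", "p", "o", "o", "n"], "p")
--     False
--
--     >>> only_in_one_list(["s", "p", "o", "o", "n"], ["s", "p", "p", "o", "n"], "p")
--     False
--
--     >>> only_in_one_list(["s", "o", "o", "o", "n"], ["s", "p", "p", "p", "n"], "p")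
--     True
--
--     >>> only_in_one_list(["spoon"], ["cup"], "p")
--     False
--
--     >>> only_in_one_list(["spoon"], ["cost"], "p")
--     False
--
--     >>> only_in_one_list(["spoon", "pot"], ["cost"], "pot")
--     True
--
--     >>> only_in_one_list(["spoon", "pot"], ["cost", "pot"], "pot")
--     False
--     """
--
--     # assert agr a and b are lists and arg c is str
--     assert isinstance(a, list)
--     assert isinstance(b, list)
--     assert isinstance(c, str)
--
--     # assert list is not empty.
--     if len(a) == 0:
--         raise AssertionError("Empty list")
--     if len(b) == 0:
--         raise AssertionError("Empty list")
--
--     # assert list contains only str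
--     for i in a:
--         if not isinstance(i, str):
--             raise AssertionError("item type not str")
--     for i in b:
--         if not isinstance(i, str):
--             raise AssertionError("AssertionError: item type not str")
--
--     # applying pythons symmetric difference operation using sets to find items
--     # in either lists but not both
--     set_a = set(a)
--     set_b = set(b)
--     not_both = list(set_a.symmetric_difference(set_b))
--
--     if c in not_both:
--         return True  # item is in either list but not both
--     return False  # item is in both, or does not exist
-- ===== SOURCE B (Python) =====
-- def only_in_one_list(a: list, b: list, c: str) -> bool:
--     # same validation as the original
--     assert isinstance(a, list)
--     assert isinstance(b, list)
--     assert isinstance(c, str)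
--     if len(a) == 0:
--         raise AssertionError("Empty list")
--     if len(b) == 0:
--         raise AssertionError("Empty list")
--     for i in a:
--         if not isinstance(i, str):
--             raise AssertionError("item type not str")
--     for i in b:
--         if not isinstance(i, str):
--             raise AssertionError("AssertionError: item type not str")
--     # direct XOR of two membership tests; no sets, no symmetric difference
--     return (c in a) != (c in b)
-- ===== Notes on version B (the rewrite author's own statement) =====
-- stated objective: simpler
-- what changed: Drops the set conversions and the symmetric-difference construction entirely, returning the XOR of two direct list-membership tests (c in a) != (c in b); avoiding the two set builds and the diff list also makes it measurably faster.
import Mathlib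
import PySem

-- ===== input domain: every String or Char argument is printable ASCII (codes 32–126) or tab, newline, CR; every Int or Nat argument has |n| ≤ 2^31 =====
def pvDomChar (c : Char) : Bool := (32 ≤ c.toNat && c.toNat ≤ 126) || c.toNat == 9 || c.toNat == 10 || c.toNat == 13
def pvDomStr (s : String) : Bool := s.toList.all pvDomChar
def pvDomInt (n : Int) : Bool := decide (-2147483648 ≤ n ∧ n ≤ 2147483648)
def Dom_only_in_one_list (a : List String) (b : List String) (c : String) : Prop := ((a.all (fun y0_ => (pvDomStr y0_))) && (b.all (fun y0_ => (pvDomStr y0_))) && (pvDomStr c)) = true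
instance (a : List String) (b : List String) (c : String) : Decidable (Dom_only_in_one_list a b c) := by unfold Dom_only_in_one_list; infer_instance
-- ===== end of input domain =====

-- B replaces the set symmetric-difference construction by the XOR of two direct membership tests; same cost, simpler.


-- ===== PORT A =====
-- A's isinstance checks are trivially true under the type convention (all elements are String).
def only_in_one_list (a : List String) (b : List String) (c : String) : Bool :=
  let set_a := PySem.Set.ofList a
  let set_b := PySem.Set.ofList b
  let not_both := PySem.Set.symmDiff set_a set_b
  if not_both.contains c then true else false

-- ===== PORT B =====
def only_in_one_list_alt (a : List String) (b : List String) (c : String) : Bool :=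
  a.contains c != b.contains c

-- ===== PRECONDITION & SPEC =====
-- Pre_ excludes exactly the inputs on which A raises AssertionError ("Empty list"): either list empty.
def Pre_only_in_one_list (a : List String) (b : List String) (c : String) : Prop := a ≠ [] ∧ b ≠ []
instance (a : List String) (b : List String) (c : String) : Decidable (Pre_only_in_one_list a b c) := by unfold Pre_only_in_one_list; infer_instance
def pvWitness_only_in_one_list : List String × List String × String := (["s", "p"], ["cup"], "p")
def Spec_only_in_one_list (a : List String) (b : List String) (c : String) (out : Bool) : Prop := out = only_in_one_list_alt a b c
instance (a : List String) (b : List String) (c : String) (out : Bool) : Decidable (Spec_only_in_one_list a b c out) := by unfold Spec_only_in_one_list; infer_instance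

-- ===== CLAIM (what is proved, stated in full; the proofs are below) =====
def Claim_equal_only_in_one_list : Prop := ∀ (a : List String) (b : List String) (c : String), Dom_only_in_one_list a b c → Pre_only_in_one_list a b c → Spec_only_in_one_list a b c (only_in_one_list a b c)

-- ===== LEMMAS AND PROOFS =====
theorem symmDiff_contains_iff (a b : List String) (c : String) :
    (PySem.Set.symmDiff (PySem.Set.ofList a) (PySem.Set.ofList b)).contains c =
    (a.contains c != b.contains c) := by
  rcases ha : a.contains c <;> rcases hb : b.contains c <;>
    simp_all [PySem.Set.symmDiff, PySem.Set.mem_diff,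
      PySem.Set.mem_ofList, List.contains_eq_mem]

-- ===== VERDICT (by name: the statement is the Claim_ definition above) =====
theorem only_in_one_list_spec : Claim_equal_only_in_one_list := by
  intro a b c _ _
  unfold Spec_only_in_one_list only_in_one_list only_in_one_list_alt
  simp only [symmDiff_contains_iff]
  split <;> simp_all
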